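-- pv_equiv track=rewrite | github.com/henryandpartners/dna-textile | src/pattern_generator.py | _detect_homopolymer_runs
-- ===== SOURCE A (Python) =====
-- from typing import Dict, List, Optional, Tuple
--
-- def _detect_homopolymer_runs(
--     sequence: str
-- ) -> List[Tuple[str, int, int]]:
--     """Detect homopolymer runs: list of (base, start, length)."""
--     runs: List[Tuple[str, int, int]] = []
--     if not sequence:
--         return runs
--     seq = sequence.upper()
--     current_base = seq[0]
--     run_start = 0
--     for i in range(1, len(seq)):
--         if seq[i] != current_base:
--             if i - run_start >= 3:  # minimum run length
--                 runs.append((current_base, run_start, i - run_start))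
--             current_base = seq[i]
--             run_start = i
--     # Last run
--     if len(seq) - run_start >= 3:
--         runs.append((current_base, run_start, len(seq) - run_start))
--     return runs
-- ===== SOURCE B (Python) =====
-- from typing import List, Tuple
--
--
-- def _detect_homopolymer_runs(
--     sequence: str
-- ) -> List[Tuple[str, int, int]]:
--     """Detect homopolymer runs: list of (base, start, length)."""
--     seq = sequence.upper()
--     n = len(seq)
--     # Pass 1: indices where a new run begins, plus the final sentinel n.
--     bounds = [i for i in range(n) if i == 0 or seq[i] != seq[i - 1]] + [n]
--     # Pass 2: adjacent boundary pairs delimit the runs; keep the long ones.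
--     return [(seq[a], a, b - a)
--             for a, b in zip(bounds, bounds[1:])
--             if b - a >= 3]
-- ===== Notes on version B (the rewrite author's own statement) =====
-- stated objective: alternative
-- what changed: Replaces A's single-pass current_base/run_start state machine (with separate trailing-run flush) by two staged passes: first a comprehension collecting run-boundary indices plus a sentinel, then zipping adjacent boundaries and filtering pairs at distance >= 3.
import Mathlib
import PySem

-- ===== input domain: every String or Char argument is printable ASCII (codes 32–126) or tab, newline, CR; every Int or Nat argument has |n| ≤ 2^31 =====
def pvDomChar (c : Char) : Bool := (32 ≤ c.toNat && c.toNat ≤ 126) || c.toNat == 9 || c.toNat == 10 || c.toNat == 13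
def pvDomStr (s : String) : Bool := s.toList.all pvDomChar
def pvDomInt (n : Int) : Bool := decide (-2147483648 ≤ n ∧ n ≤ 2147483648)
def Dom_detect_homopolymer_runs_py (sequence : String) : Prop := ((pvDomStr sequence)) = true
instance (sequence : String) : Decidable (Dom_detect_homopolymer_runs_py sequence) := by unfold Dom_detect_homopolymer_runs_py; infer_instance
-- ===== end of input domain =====

-- B replaces A's single-pass current_base/run_start state machine (with a separate
-- trailing-run flush) by two staged passes: collect all run-boundary indices plus a
-- sentinel, then zip adjacent boundaries and keep pairs at distance >= 3. Same cost;
-- return values proved equal on all inputs.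

-- ===== PORT A =====
-- Python's seq[i] is a 1-char string; ported as Char and rendered via String.ofList [c] in the output tuples.
def stepA (seq : List Char) (st : List (String × Int × Int) × Char × Int) (i : Int) :
    List (String × Int × Int) × Char × Int :=
  let runs := st.1
  let current_base := st.2.1
  let run_start := st.2.2
  if PySem.List.pyGetD seq i ' ' ≠ current_base then
    (runs ++ (if i - run_start ≥ 3 then [(String.ofList [current_base], run_start, i - run_start)] else []),
     PySem.List.pyGetD seq i ' ', i)
  else (runs, current_base, run_start)

def detect_homopolymer_runs_py (sequence : String) : List (String × Int × Int) :=
  let runs : List (String × Int × Int) := []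
  if sequence.toList = [] then runs
  else
    let seq := PySem.Chars.upper sequence.toList
    let current_base := PySem.List.pyGetD seq 0 ' '
    let run_start : Int := 0
    let st := (PySem.List.pyRange 1 (seq.length : Int) 1).foldl (stepA seq) (runs, current_base, run_start)
    st.1 ++ (if (seq.length : Int) - st.2.2 ≥ 3
             then [(String.ofList [st.2.1], st.2.2, (seq.length : Int) - st.2.2)] else [])

-- ===== PORT B =====
-- the comprehension filter of Source B: 'i == 0 or seq[i] != seq[i-1]' (indices always in range)
def pvBnd (seq : List Char) (i : Nat) : Bool :=
  i == 0 || seq.getD i ' ' != seq.getD (i - 1) ' '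

-- 'bounds = [i for i in range(n) if i == 0 or seq[i] != seq[i-1]] + [n]'
def pvBounds (seq : List Char) : List Nat :=
  (List.range seq.length).filter (pvBnd seq) ++ [seq.length]

-- '[(seq[a], a, b-a) for a, b in zip(bounds, bounds[1:]) if b - a >= 3]'
def pvRuns (seq : List Char) : List (String × Int × Int) :=
  let bounds := pvBounds seq
  (bounds.zip (bounds.drop 1)).filterMap (fun p =>
    if (p.2 : Int) - (p.1 : Int) ≥ 3 then
      some (String.ofList [seq.getD p.1 ' '], (p.1 : Int), (p.2 : Int) - (p.1 : Int))
    else none)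

def detect_homopolymer_runs_py_alt (sequence : String) : List (String × Int × Int) :=
  pvRuns (PySem.Chars.upper sequence.toList)

-- ===== PRECONDITION & SPEC =====
def Spec_detect_homopolymer_runs_py (sequence : String) (out : List (String × Int × Int)) : Prop := out = detect_homopolymer_runs_py_alt sequence
instance (sequence : String) (out : List (String × Int × Int)) : Decidable (Spec_detect_homopolymer_runs_py sequence out) := by unfold Spec_detect_homopolymer_runs_py; infer_instance

-- ===== CLAIM (what is proved, stated in full; the proofs are below) =====
def Claim_equal_detect_homopolymer_runs_py : Prop := ∀ (sequence : String), Dom_detect_homopolymer_runs_py sequence → Spec_detect_homopolymer_runs_py sequence (detect_homopolymer_runs_py sequence)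

-- ===== LEMMAS AND PROOFS =====

-- canonical run decomposition used to relate both ports
def pvTakeRun (c : Char) : List Char → Nat × List Char
  | [] => (0, [])
  | d :: ds => if d = c then
      let r := pvTakeRun c ds
      (r.1 + 1, r.2)
    else (0, d :: ds)

lemma pvTakeRun_length_le (c : Char) (l : List Char) : (pvTakeRun c l).2.length ≤ l.length := by
  induction l with
  | nil => simp [pvTakeRun]
  | cons d ds ih =>
    by_cases h : d = c
    · simp only [pvTakeRun, if_pos h]
      exact le_trans ih (Nat.le_succ _)
    · simp [pvTakeRun, if_neg h]

-- one run per iteration, running start offset: the common normal form of both ports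
def pvGroupLoop : List Char → Int → List (String × Int × Int)
  | [], _ => []
  | c :: cs, start =>
    let r := pvTakeRun c cs
    let len : Nat := r.1 + 1
    (if 3 ≤ len then [(String.ofList [c], start, (len : Int))] else []) ++
      pvGroupLoop r.2 (start + (len : Int))
termination_by l _ => l.length
decreasing_by exact Nat.lt_succ_of_le (pvTakeRun_length_le c cs)

lemma pvTakeRun_decomp (c : Char) (l : List Char) :
    List.replicate (pvTakeRun c l).1 c ++ (pvTakeRun c l).2 = l := by
  induction l with
  | nil => simp [pvTakeRun]
  | cons d ds ih =>
    by_cases h : d = c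
    · simp only [pvTakeRun, if_pos h, List.replicate_succ, List.cons_append]
      rw [ih, h]
    · simp [pvTakeRun, if_neg h]

lemma pvTakeRun_rest_head (c : Char) (l : List Char) :
    ∀ d ds, (pvTakeRun c l).2 = d :: ds → d ≠ c := by
  induction l with
  | nil => intro d ds h; simp [pvTakeRun] at h
  | cons e es ih =>
    intro d ds h
    by_cases he : e = c
    · simp only [pvTakeRun, if_pos he] at h
      exact ih d ds h
    · simp only [pvTakeRun, if_neg he] at h
      cases h
      exact he

-- ===== A-side: the fold of port A computes pvGroupLoop =====

lemma pvTakeRun_replicate (c : Char) (m : Nat) (rest : List Char)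
    (h : ∀ d ds, rest = d :: ds → d ≠ c) :
    pvTakeRun c (List.replicate m c ++ rest) = (m, rest) := by
  induction m with
  | zero =>
    cases rest with
    | nil => simp [pvTakeRun]
    | cons d ds => simp [pvTakeRun, if_neg (h d ds rfl)]
  | succ m ih => simp [List.replicate_succ, pvTakeRun, ih]

lemma pvGroupLoop_replicate (c : Char) (k : Nat) (rest : List Char) (s : Int)
    (hk : 1 ≤ k) (h : ∀ d ds, rest = d :: ds → d ≠ c) :
    pvGroupLoop (List.replicate k c ++ rest) s =
      (if 3 ≤ k then [(String.ofList [c], s, (k : Int))] else []) ++ pvGroupLoop rest (s + k) := by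
  obtain ⟨m, rfl⟩ : ∃ m, k = m + 1 := ⟨k - 1, by omega⟩
  rw [List.replicate_succ, List.cons_append, pvGroupLoop,
    pvTakeRun_replicate c m rest h]

def afterFold (seq : List Char) (i : Int) (st : List (String × Int × Int) × Char × Int) :
    List (String × Int × Int) :=
  let st' := (PySem.List.pyRange i (seq.length : Int) 1).foldl (stepA seq) st
  st'.1 ++ (if (seq.length : Int) - st'.2.2 ≥ 3
            then [(String.ofList [st'.2.1], st'.2.2, (seq.length : Int) - st'.2.2)] else [])

lemma getElem_of_drop {seq cs : List Char} {d : Char} {ds : List Char} {n : Nat}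
    (hd : seq.drop n = cs) (hcs : cs = d :: ds) (hn : n < seq.length) :
    seq[n] = d := by
  have : (seq.drop n)[0]'(by simp [hd, hcs]) = d := by simp [hd, hcs]
  simpa using this

lemma main_invariant (seq : List Char) (cs : List Char) :
    ∀ (rs k : Nat) (runs : List (String × Int × Int)) (cb : Char),
    1 ≤ k → seq.drop rs = List.replicate k cb ++ cs →
    afterFold seq ((rs : Int) + (k : Int)) (runs, cb, (rs : Int)) =
      runs ++ pvGroupLoop (List.replicate k cb ++ cs) (rs : Int) := by
  induction cs with
  | nil =>
    intro rs k runs cb hk hdrop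
    have hlen : seq.length = rs + k := by
      have := congrArg List.length hdrop
      simp at this
      omega
    have hnil : PySem.List.pyRange ((rs : Int) + (k : Int)) (seq.length : Int) 1 = [] := by
      apply PySem.List.pyRange_one_eq_nil
      omega
    simp only [afterFold, hnil, List.foldl_nil]
    rw [pvGroupLoop_replicate cb k [] rs hk (by intro d ds h; cases h)]
    simp only [pvGroupLoop, List.append_nil]
    congr 1
    have h1 : (seq.length : Int) - (rs : Int) = (k : Int) := by omega
    rw [h1]
    by_cases h3 : 3 ≤ k
    · rw [if_pos (show (k : Int) ≥ 3 by exact_mod_cast h3), if_pos h3]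
    · rw [if_neg (show ¬ ((k : Int) ≥ 3) by exact_mod_cast h3), if_neg h3]
  | cons d ds ih =>
    intro rs k runs cb hk hdrop
    have hlen : seq.length = rs + k + (ds.length + 1) := by
      have := congrArg List.length hdrop
      simp at this
      omega
    have hlt : rs + k < seq.length := by omega
    have hdropi : seq.drop (rs + k) = d :: ds := by
      have h : seq.drop (rs + k) = (seq.drop rs).drop k := by
        rw [List.drop_drop]; try ring_nf
      rw [h, hdrop, List.drop_append_of_le_length (by simp)]
      simp
    have hget : PySem.List.pyGetD seq ((rs : Int) + (k : Int)) ' ' = d := by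
      have hcast : ((rs : Int) + (k : Int)) = ((rs + k : Nat) : Int) := by push_cast; ring
      rw [hcast, PySem.List.pyGetD_natCast]
      have hgd := getElem_of_drop hdropi rfl hlt
      simp [List.getD, hlt, hgd]
    have hcons : PySem.List.pyRange ((rs : Int) + (k : Int)) (seq.length : Int) 1 =
        ((rs : Int) + (k : Int)) :: PySem.List.pyRange (((rs : Int) + (k : Int)) + 1) (seq.length : Int) 1 := by
      apply PySem.List.pyRange_one_cons
      push_cast; omega
    by_cases hdc : d = cb
    · -- same base: state unchanged, the current run grows by one
      have hstep : stepA seq (runs, cb, (rs : Int)) ((rs : Int) + (k : Int)) = (runs, cb, (rs : Int)) := by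
        simp only [stepA]
        rw [hget]
        simp [hdc]
      have hdrop2 : seq.drop rs = List.replicate (k + 1) cb ++ ds := by
        rw [hdrop, hdc, List.replicate_succ', List.append_assoc]
        simp
      have key := ih rs (k + 1) runs cb (by omega) hdrop2
      have hcast : ((rs : Int) + ((k + 1 : Nat) : Int)) = ((rs : Int) + (k : Int)) + 1 := by push_cast; ring
      rw [hcast] at key
      simp only [afterFold] at key ⊢
      rw [hcons]
      simp only [List.foldl_cons, hstep]
      rw [key]
      congr 1
      rw [← hdrop2, hdrop]
    · -- new base: A emits the finished run (if long enough) and restarts at i = rs + k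
      have hstep : stepA seq (runs, cb, (rs : Int)) ((rs : Int) + (k : Int)) =
          (runs ++ (if ((rs : Int) + (k : Int)) - (rs : Int) ≥ 3
                    then [(String.ofList [cb], (rs : Int), ((rs : Int) + (k : Int)) - (rs : Int))] else []),
           d, ((rs : Int) + (k : Int))) := by
        simp only [stepA]
        rw [hget]
        rw [if_pos (show (d : Char) ≠ cb from hdc)]
      have hdrop1 : seq.drop (rs + k) = List.replicate 1 d ++ ds := by
        simpa using hdropi
      have key := ih (rs + k) 1
        (runs ++ (if ((rs : Int) + (k : Int)) - (rs : Int) ≥ 3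
                  then [(String.ofList [cb], (rs : Int), ((rs : Int) + (k : Int)) - (rs : Int))] else []))
        d (by omega) hdrop1
      have hcast : (((rs + k : Nat) : Int) + ((1 : Nat) : Int)) = ((rs : Int) + (k : Int)) + 1 := by push_cast; ring
      rw [hcast] at key
      have hcast2 : ((rs + k : Nat) : Int) = (rs : Int) + (k : Int) := by push_cast; ring
      rw [hcast2] at key
      simp only [afterFold] at key ⊢
      rw [hcons]
      simp only [List.foldl_cons, hstep]
      rw [key]
      rw [pvGroupLoop_replicate cb k (d :: ds) rs hk
        (by intro e es h; cases h; exact hdc)]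
      rw [List.append_assoc]
      congr 1
      have hd1 : List.replicate 1 d ++ ds = d :: ds := by simp
      rw [hd1]
      have hsub : ((rs : Int) + (k : Int)) - (rs : Int) = (k : Int) := by ring
      rw [hsub]
      congr 1
      by_cases h3 : 3 ≤ k
      · rw [if_pos (show (k : Int) ≥ 3 by exact_mod_cast h3), if_pos h3]
      · rw [if_neg (show ¬ ((k : Int) ≥ 3) by exact_mod_cast h3), if_neg h3]

-- ===== B-side: the boundary/zip pipeline also computes pvGroupLoop =====

def pvRunsShift (s : Int) (t : String × Int × Int) : String × Int × Int := (t.1, t.2.1 + s, t.2.2)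

lemma pvRunsShift_zero : ∀ t, pvRunsShift 0 t = t := by
  intro ⟨a, b, c⟩; simp [pvRunsShift]

lemma pvRunsShift_comp (s k : Int) : ∀ t, pvRunsShift s (pvRunsShift k t) = pvRunsShift (s + k) t := by
  intro ⟨a, b, c⟩; simp [pvRunsShift]; ring

lemma filterMap_eq_map_filterMap {α β γ : Type} (f : α → Option β) (g : α → Option γ) (h : γ → β)
    (l : List α) (H : ∀ a, f a = (g a).map h) : l.filterMap f = (l.filterMap g).map h := by
  induction l with
  | nil => simp
  | cons a t ih =>
    rw [List.filterMap_cons, List.filterMap_cons, H a]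
    cases g a with
    | none => simpa using ih
    | some v => simp [ih]

lemma pvBounds_head (l : List Char) : ∃ t, pvBounds l = 0 :: t := by
  cases l with
  | nil => exact ⟨[], rfl⟩
  | cons c cs =>
    refine ⟨?_, ?_⟩
    · exact ((List.map Nat.succ (List.range cs.length)).filter (pvBnd (c :: cs)) ++ [cs.length + 1])
    · simp only [pvBounds, List.length_cons, List.range_succ_eq_map]
      rw [List.filter_cons_of_pos (by simp [pvBnd])]
      simp

lemma getD_run_left (k : Nat) (c : Char) (rest : List Char) (i : Nat) (hi : i < k) :
    (List.replicate k c ++ rest).getD i ' ' = c := by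
  rw [List.getD_append _ _ _ _ (by simpa using hi)]
  exact List.getD_replicate _ hi

lemma getD_run_right (k : Nat) (c : Char) (rest : List Char) (i : Nat) :
    (List.replicate k c ++ rest).getD (i + k) ' ' = rest.getD i ' ' := by
  rw [List.getD_append_right _ _ _ _ (by simp)]
  simp

lemma filter_range_run (l : List Char) (k : Nat) (c : Char) (rest : List Char)
    (hl : l = List.replicate k c ++ rest) (hk : 1 ≤ k) :
    (List.range k).filter (pvBnd l) = [0] := by
  obtain ⟨m, rfl⟩ : ∃ m, k = m + 1 := ⟨k - 1, by omega⟩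
  rw [List.range_succ_eq_map]
  rw [List.filter_cons_of_pos (by simp [pvBnd])]
  have : (List.map Nat.succ (List.range m)).filter (pvBnd l) = [] := by
    rw [List.filter_eq_nil_iff]
    intro a ha
    simp only [List.mem_map, List.mem_range] at ha
    obtain ⟨i, hi, rfl⟩ := ha
    simp only [pvBnd, Nat.succ_eq_add_one, Bool.or_eq_true, not_or]
    refine ⟨by simp, ?_⟩
    have h1 : l.getD (i + 1) ' ' = c := by
      rw [hl]; exact getD_run_left _ _ _ _ (by omega)
    have h2 : l.getD (i + 1 - 1) ' ' = c := by
      rw [hl]; exact getD_run_left _ _ _ _ (by omega)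
    rw [h1, h2]
    simp
  rw [this]

lemma bnd_shift (l : List Char) (k : Nat) (c : Char) (rest : List Char)
    (hl : l = List.replicate k c ++ rest) (hk : 1 ≤ k)
    (hr : ∀ d ds, rest = d :: ds → d ≠ c) :
    ∀ i, i < rest.length → pvBnd l (k + i) = pvBnd rest i := by
  intro i hi
  cases i with
  | zero =>
    obtain ⟨d, ds, rfl⟩ : ∃ d ds, rest = d :: ds := by
      cases rest with
      | nil => simp at hi
      | cons d ds => exact ⟨d, ds, rfl⟩
    have h1 : l.getD k ' ' = d := by
      rw [hl]
      have := getD_run_right k c (d :: ds) 0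
      simpa using this
    have h2 : l.getD (k - 1) ' ' = c := by
      rw [hl]; exact getD_run_left _ _ _ _ (by omega)
    have hd : d ≠ c := hr d ds rfl
    simp only [pvBnd, Nat.add_zero]
    rw [h1]
    have hk0 : (k == 0) = false := by simp; omega
    rw [hk0, h2]
    simp [bne, hd]
  | succ j =>
    have h1 : l.getD (k + (j + 1)) ' ' = rest.getD (j + 1) ' ' := by
      rw [hl]
      have := getD_run_right k c rest (j + 1)
      rw [← this]; ring_nf
    have h2 : l.getD (k + (j + 1) - 1) ' ' = rest.getD j ' ' := by
      rw [hl]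
      have := getD_run_right k c rest j
      have he : k + (j + 1) - 1 = j + k := by omega
      rw [he, this]
    simp only [pvBnd, h1, h2]
    have e1 : (k + (j + 1) == 0) = false := by simp
    have e2 : (j + 1 == 0) = false := by simp
    rw [e1, e2]
    norm_num

lemma pvBounds_run (l : List Char) (k : Nat) (c : Char) (rest : List Char)
    (hl : l = List.replicate k c ++ rest) (hk : 1 ≤ k)
    (hr : ∀ d ds, rest = d :: ds → d ≠ c) :
    pvBounds l = 0 :: (pvBounds rest).map (· + k) := by
  have hlen : l.length = k + rest.length := by simp [hl]
  have hsplit : List.range l.length =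
      List.range k ++ (List.range rest.length).map (fun x => k + x) := by
    rw [hlen, List.range_add]
  simp only [pvBounds, hsplit, List.filter_append]
  rw [filter_range_run l k c rest hl hk]
  rw [List.filter_map]
  have hcong : (List.range rest.length).filter (pvBnd l ∘ (fun x => k + x)) =
      (List.range rest.length).filter (pvBnd rest) := by
    apply List.filter_congr
    intro i hi
    exact bnd_shift l k c rest hl hk hr i (List.mem_range.mp hi)
  rw [hcong]
  have hmapc : ∀ (xs : List Nat), xs.map (fun x => k + x) = xs.map (· + k) := by
    intro xs; apply List.map_congr_left; intro a _; omega
  rw [hmapc]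
  simp only [List.map_append, List.map_cons, List.map_nil] at *
  simp [hlen, Nat.add_comm]

lemma pvRuns_run (c : Char) (cs : List Char) (k : Nat) (rest : List Char)
    (hdec : c :: cs = List.replicate k c ++ rest) (hk : 1 ≤ k)
    (hhead : ∀ d ds, rest = d :: ds → d ≠ c) :
    pvRuns (c :: cs) =
      (if 3 ≤ k then [(String.ofList [c], 0, (k : Int))] else []) ++
        (pvRuns rest).map (pvRunsShift k) := by
  have hb : pvBounds (c :: cs) = 0 :: (pvBounds rest).map (· + k) :=
    pvBounds_run _ k c rest hdec hk hhead
  obtain ⟨T, hT⟩ := pvBounds_head rest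
  have hzip : (pvBounds (c :: cs)).zip ((pvBounds (c :: cs)).drop 1) =
      (0, k) :: ((pvBounds rest).map (· + k)).zip (((pvBounds rest).drop 1).map (· + k)) := by
    rw [hb, hT]
    simp
  simp only [pvRuns]
  rw [hzip, List.filterMap_cons]
  have hzm : ((pvBounds rest).map (· + k)).zip (((pvBounds rest).drop 1).map (· + k)) =
      ((pvBounds rest).zip ((pvBounds rest).drop 1)).map (Prod.map (· + k) (· + k)) :=
    List.zip_map
  rw [hzm, List.filterMap_map]
  have hget0 : (c :: cs).getD 0 ' ' = c := rfl
  have hfirst : (if ((k : Nat) : Int) - ((0 : Nat) : Int) ≥ 3 then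
      some (String.ofList [(c :: cs).getD (0 : Nat) ' '], ((0 : Nat) : Int), ((k : Nat) : Int) - ((0 : Nat) : Int)) else none) =
      if 3 ≤ k then some (String.ofList [c], (0 : Int), (k : Int)) else none := by
    rw [hget0]
    by_cases h3 : 3 ≤ k
    · rw [if_pos (by push_cast; omega), if_pos h3]
      norm_num
    · rw [if_neg (by push_cast; omega), if_neg h3]
  have hrestpart :
      ((pvBounds rest).zip ((pvBounds rest).drop 1)).filterMap
        ((fun p : Nat × Nat =>
          if ((p.2 : Int)) - ((p.1 : Int)) ≥ 3 then
            some (String.ofList [(c :: cs).getD p.1 ' '], ((p.1 : Int)), ((p.2 : Int)) - ((p.1 : Int)))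
          else none) ∘ Prod.map (· + k) (· + k)) =
      (((pvBounds rest).zip ((pvBounds rest).drop 1)).filterMap
        (fun p : Nat × Nat =>
          if ((p.2 : Int)) - ((p.1 : Int)) ≥ 3 then
            some (String.ofList [rest.getD p.1 ' '], ((p.1 : Int)), ((p.2 : Int)) - ((p.1 : Int)))
          else none)).map (pvRunsShift k) := by
    apply filterMap_eq_map_filterMap
    intro p
    obtain ⟨a, b⟩ := p
    simp only [Function.comp, Prod.map]
    have hc1 : (((b + k : Nat)) : Int) - (((a + k : Nat)) : Int) = (b : Int) - (a : Int) := by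
      push_cast; ring
    have hgd : (c :: cs).getD (a + k) ' ' = rest.getD a ' ' := by
      rw [hdec]; exact getD_run_right k c rest a
    rw [hc1, hgd]
    by_cases h3 : (b : Int) - (a : Int) ≥ 3
    · rw [if_pos h3, if_pos h3]
      simp only [Option.map_some, pvRunsShift]
      have hck : ((a + k : Nat) : Int) = (a : Int) + (k : Int) := by push_cast; ring
      rw [hck]
    · rw [if_neg h3, if_neg h3]
      simp
  rw [hfirst, hrestpart]
  by_cases h3 : 3 ≤ k
  · rw [if_pos h3, if_pos h3]
    simp
  · rw [if_neg h3, if_neg h3]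
    simp

lemma pvRuns_eq_groupLoop : ∀ (n : Nat) (l : List Char), l.length ≤ n → ∀ s : Int,
    pvGroupLoop l s = (pvRuns l).map (pvRunsShift s) := by
  intro n
  induction n with
  | zero =>
    intro l hl s
    cases l with
    | nil => simp [pvGroupLoop, pvRuns, pvBounds]
    | cons c cs => simp at hl
  | succ n ih =>
    intro l hl s
    cases l with
    | nil => simp [pvGroupLoop, pvRuns, pvBounds]
    | cons c cs =>
      have hdec : c :: cs = List.replicate ((pvTakeRun c cs).1 + 1) c ++ (pvTakeRun c cs).2 := by
        rw [List.replicate_succ, List.cons_append, pvTakeRun_decomp]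
      have hhead : ∀ d ds, (pvTakeRun c cs).2 = d :: ds → d ≠ c := pvTakeRun_rest_head c cs
      have hrestlen : (pvTakeRun c cs).2.length ≤ n := by
        have h1 := pvTakeRun_length_le c cs
        simp at hl
        omega
      have hloop : pvGroupLoop (c :: cs) s =
          (if 3 ≤ (pvTakeRun c cs).1 + 1 then
            [(String.ofList [c], s, (((pvTakeRun c cs).1 + 1 : Nat) : Int))] else []) ++
            pvGroupLoop (pvTakeRun c cs).2 (s + (((pvTakeRun c cs).1 + 1 : Nat) : Int)) := by
        rw [pvGroupLoop]
      rw [hloop, ih _ hrestlen,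
        pvRuns_run c cs ((pvTakeRun c cs).1 + 1) (pvTakeRun c cs).2 hdec (by omega) hhead]
      rw [List.map_append, List.map_map]
      congr 1
      · by_cases h3 : 3 ≤ (pvTakeRun c cs).1 + 1
        · rw [if_pos h3, if_pos h3]
          simp [pvRunsShift]
        · rw [if_neg h3, if_neg h3]
          simp
      · apply List.map_congr_left
        intro t _
        rw [Function.comp_apply, pvRunsShift_comp]

-- ===== VERDICT (by name: the statement is the Claim_ definition above) =====
theorem detect_homopolymer_runs_py_spec : Claim_equal_detect_homopolymer_runs_py := by
  intro sequence _
  unfold Spec_detect_homopolymer_runs_py detect_homopolymer_runs_py detect_homopolymer_runs_py_alt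
  by_cases hempty : sequence.toList = []
  · have hu : PySem.Chars.upper ([] : List Char) = [] := rfl
    simp [hempty, hu, pvRuns, pvBounds]
  · rw [if_neg hempty]
    set seq := PySem.Chars.upper sequence.toList with hseq
    have hne : seq ≠ [] := by
      intro h
      apply hempty
      rw [hseq] at h
      simpa [PySem.Chars.upper] using h
    obtain ⟨c, cs, hc⟩ := List.exists_cons_of_ne_nil hne
    have hget0 : PySem.List.pyGetD seq 0 ' ' = c := by
      rw [hc]; exact PySem.List.pyGetD_zero_cons c cs ' '
    have hdrop : seq.drop 0 = List.replicate 1 c ++ cs := by simp [hc]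
    have key := main_invariant seq cs 0 1 [] c (by omega) hdrop
    simp only [afterFold, Nat.cast_zero, Nat.cast_one, zero_add, List.nil_append] at key
    show afterFold seq 1 ([], PySem.List.pyGetD seq 0 ' ', 0) = pvRuns seq
    rw [hget0]
    simp only [afterFold]
    refine key.trans ?_
    rw [← hdrop]
    simp only [List.drop_zero]
    rw [pvRuns_eq_groupLoop seq.length seq le_rfl 0]
    rw [List.map_congr_left (fun t _ => pvRunsShift_zero t)]
    simp
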